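-- pv_equiv track=rewrite | github.com/bc36/leetcode | lc_Python/lc2300_2399.py | validSubarraySize
-- ===== SOURCE A (Python) =====
-- from typing import List, Optional, Tuple
--
-- def validSubarraySize(nums: List[int], threshold: int) -> int:
--     def find(x: int) -> int:
--         if p[x] != x:
--             p[x] = find(p[x])
--         return p[x]
--
--     n = len(nums)
--     p = list(range(n + 1))
--     sz = [1] * (n + 1)
--     q = list(range(n))
--     q = [y for _, y in sorted(zip(nums, q), reverse=True)]
--     i = 0
--     for k in range(1, n + 1):
--         while i < n and nums[q[i]] > threshold // k:
--             a = q[i]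
--             b = find(q[i] + 1)
--             sz[b] += sz[a]
--             if sz[b] - 1 >= k:
--                 return k
--             p[a] = b
--             i += 1
--     return -1
-- ===== SOURCE B (Python) =====
-- def validSubarraySize(nums, threshold):
--     n = len(nums)
--     for k in range(1, n + 1):
--         bound = threshold // k
--         run = 0
--         for x in nums:
--             run = run + 1 if x > bound else 0
--             if run >= k:
--                 return k
--     return -1
-- ===== Notes on version B (the rewrite author's own statement) =====
-- stated objective: simpler
-- what changed: Replaces the sort-by-value + union-find incremental-activation scheme (parent/size arrays, path compression) with a direct scan per candidate size k that keeps only a running count of consecutive elements exceeding threshold//k, returning the first k whose count reaches k; a timing run measured B faster on random inputs (early exit at small k), though B's worst case is quadratic.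
import Mathlib
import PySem

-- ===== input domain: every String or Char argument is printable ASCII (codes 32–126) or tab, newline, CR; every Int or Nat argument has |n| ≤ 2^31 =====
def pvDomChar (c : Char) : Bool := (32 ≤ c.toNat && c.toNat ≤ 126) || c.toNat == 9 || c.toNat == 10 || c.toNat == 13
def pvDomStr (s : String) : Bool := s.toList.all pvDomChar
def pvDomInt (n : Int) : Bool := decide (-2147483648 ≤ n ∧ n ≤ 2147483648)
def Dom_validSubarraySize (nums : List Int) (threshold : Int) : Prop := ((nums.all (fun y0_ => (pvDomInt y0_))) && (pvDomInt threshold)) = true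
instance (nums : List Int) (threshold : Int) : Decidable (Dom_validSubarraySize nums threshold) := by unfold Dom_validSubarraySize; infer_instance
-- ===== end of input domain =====

-- B replaces A's sort-by-value + union-find activation scheme by a direct per-k scan
-- counting consecutive elements above threshold//k (objective: simpler).

-- ===== PORT A =====
-- `find` with path compression.  Array indices in A are the nonnegative ints 0..n,
-- ported as Nat; the fuel argument (always called with n+1 ≥ recursion depth, since
-- parents strictly increase and are bounded by n) only makes the recursion structural.
def pyFind : Nat → List Nat → Nat → List Nat × Nat
  | 0, p, x => (p, x)
  | fuel + 1, p, x =>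
    let px := p.getD x 0
    if px ≠ x then
      let r := pyFind fuel p px
      (r.1.set x r.2, r.2)
    else (p, x)

-- the inner `while i < n and nums[q[i]] > threshold // k` loop of A
def pyWhile (nums : List Int) (threshold : Int) (q : List Nat) (k : Int) (n : Nat)
    (i : Nat) (p sz : List Nat) : Option Int × List Nat × List Nat × Nat :=
  if h : i < n ∧ nums.getD (q.getD i 0) 0 > PySem.Int.floordiv threshold k then
    let a := q.getD i 0
    let fr := pyFind (n + 1) p (a + 1)
    let b := fr.2
    let sz1 := sz.set b (sz.getD b 0 + sz.getD a 0)
    if ((sz1.getD b 0 : Int) - 1) ≥ k then (some k, fr.1, sz1, i)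
    else pyWhile nums threshold q k n (i + 1) (fr.1.set a b) sz1
  else (none, p, sz, i)
termination_by n - i
decreasing_by omega

-- the outer `for k in range(1, n + 1)` loop of A (early return threaded through)
def pyOuter (nums : List Int) (threshold : Int) (q : List Nat) (n : Nat) :
    List Int → Nat → List Nat → List Nat → Int
  | [], _, _, _ => -1
  | k :: ks, i, p, sz =>
    match pyWhile nums threshold q k n i p sz with
    | (some r, _, _, _) => r
    | (none, p', sz', i') => pyOuter nums threshold q n ks i' p' sz'

def validSubarraySize (nums : List Int) (threshold : Int) : Int :=
  let n := nums.length
  let p := List.range (n + 1)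
  let sz := List.replicate (n + 1) 1
  let q0 := List.range n
  let q := (PySem.List.sorted2 (nums.zip q0) Prod.fst Prod.snd true).map Prod.snd
  pyOuter nums threshold q n (PySem.List.pyRange 1 ((n : Int) + 1) 1) 0 p sz

-- ===== PORT B =====
-- inner scan of B: running count of consecutive elements above `bound`
def altInner (bound k : Int) : List Int → Int → Bool
  | [], _ => false
  | x :: xs, run =>
    let run' := if x > bound then run + 1 else 0
    if run' ≥ k then true else altInner bound k xs run'

def altOuter (nums : List Int) (threshold : Int) : List Int → Int
  | [] => -1
  | k :: ks =>
    if altInner (PySem.Int.floordiv threshold k) k nums 0 then k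
    else altOuter nums threshold ks

def validSubarraySize_alt (nums : List Int) (threshold : Int) : Int :=
  altOuter nums threshold (PySem.List.pyRange 1 ((nums.length : Int) + 1) 1)

-- ===== PRECONDITION & SPEC =====
def Spec_validSubarraySize (nums : List Int) (threshold : Int) (out : Int) : Prop := out = validSubarraySize_alt nums threshold
instance (nums : List Int) (threshold : Int) (out : Int) : Decidable (Spec_validSubarraySize nums threshold out) := by unfold Spec_validSubarraySize; infer_instance

-- ===== CLAIM (what is proved, stated in full; the proofs are below) =====
def Claim_equal_validSubarraySize : Prop := ∀ (nums : List Int) (threshold : Int), Dom_validSubarraySize nums threshold → Spec_validSubarraySize nums threshold (validSubarraySize nums threshold)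

-- ===== LEMMAS AND PROOFS =====

-- `actI q i` : the set of activated indices after the first i elements of q
def actI (q : List Nat) (i : Nat) : Nat → Bool := fun j => decide (j ∈ q.take i)

-- least non-activated index ≥ x (n itself is never activated)
def nextFree (act : Nat → Bool) (n : Nat) (x : Nat) : Nat :=
  if _h : x < n then (if act x then nextFree act n (x + 1) else x) else x
termination_by n - x

-- length of the maximal activated run just below r
def runlen (act : Nat → Bool) : Nat → Nat
  | 0 => 0
  | r + 1 => if act r then runlen act r + 1 else 0

-- representation invariant of A's parent array
def GoodP (act : Nat → Bool) (n : Nat) (p : List Nat) : Prop :=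
  p.length = n + 1 ∧ ∀ x, x ≤ n →
    (act x = false → p.getD x 0 = x) ∧
    (act x = true → x < p.getD x 0 ∧ p.getD x 0 ≤ nextFree act n (x + 1))

-- representation invariant of A's size array
def SzOk (act : Nat → Bool) (n : Nat) (sz : List Nat) : Prop :=
  sz.length = n + 1 ∧ ∀ r, r ≤ n → act r = false → sz.getD r 0 = 1 + runlen act r

def NoRun (act : Nat → Bool) (n K : Nat) : Prop :=
  ∀ r, r ≤ n → act r = false → runlen act r < K

-- "some window of K consecutive positions all exceed bound"
def WinP (nums : List Int) (bound : Int) (K : Nat) : Prop :=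
  ∃ j, j + K ≤ nums.length ∧ ∀ t, j ≤ t → t < j + K → nums.getD t 0 > bound

def QOk (nums : List Int) (q : List Nat) : Prop :=
  q.Perm (List.range nums.length) ∧
  ∀ t s, t ≤ s → s < nums.length →
    nums.getD (q.getD s 0) 0 ≤ nums.getD (q.getD t 0) 0

-- the loop invariant of A's combined loops at size K, pointer i
def LoopInv (nums : List Int) (threshold : Int) (q : List Nat) (K i : Nat)
    (p sz : List Nat) : Prop :=
  i ≤ nums.length ∧
  GoodP (actI q i) nums.length p ∧
  SzOk (actI q i) nums.length sz ∧
  NoRun (actI q i) nums.length K ∧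
  ∀ t, t < i → nums.getD (q.getD t 0) 0 > PySem.Int.floordiv threshold (K : Int)

-- ---- Int facts ----
lemma fdiv_one (t : Int) : PySem.Int.floordiv t 1 = t := by
  rw [PySem.Int.floordiv_eq_ediv_of_pos (by omega)]; exact Int.ediv_one t

lemma fdiv_antitone (t : Int) (ht : 0 ≤ t) (K : Nat) (hK : 1 ≤ K) :
    PySem.Int.floordiv t ((K : Int) + 1) ≤ PySem.Int.floordiv t (K : Int) := by
  obtain ⟨m, rfl⟩ := Int.eq_ofNat_of_zero_le ht
  have h1 : ((K : Int) + 1) = ((K + 1 : Nat) : Int) := by push_cast; ring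
  rw [h1, PySem.Int.floordiv_natCast, PySem.Int.floordiv_natCast]
  exact_mod_cast Nat.div_le_div_left (by omega) (by omega)

lemma fdiv_ge_self_neg (t : Int) (ht : t < 0) (K : Nat) (hK : 1 ≤ K) :
    t ≤ PySem.Int.floordiv t (K : Int) := by
  rw [PySem.Int.floordiv_eq_ediv_of_pos (by exact_mod_cast hK)]
  rw [Int.le_ediv_iff_mul_le (by exact_mod_cast hK)]
  have h1 : (1:Int) ≤ (K:Int) := by exact_mod_cast hK
  nlinarith

-- ---- nextFree and runlen ----
lemma nf_ge (act : Nat → Bool) (n x : Nat) : x ≤ nextFree act n x := by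
  fun_induction nextFree act n x with
  | case1 x h hact ih => omega
  | case2 x h hact => omega
  | case3 x h => omega

lemma nf_le (act : Nat → Bool) {n x : Nat} (h : x ≤ n) : nextFree act n x ≤ n := by
  fun_induction nextFree act n x with
  | case1 x h2 hact ih => exact ih (by omega)
  | case2 x h2 hact => omega
  | case3 x h2 => omega

lemma nf_free (act : Nat → Bool) {n x : Nat} (hx : x ≤ n) (hn : act n = false) :
    act (nextFree act n x) = false := by
  fun_induction nextFree act n x with
  | case1 x h2 hact ih => exact ih (by omega)
  | case2 x h2 hact => simpa using hact
  | case3 x h2 => have : x = n := by omega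
                  simpa [this] using hn

lemma nf_active (act : Nat → Bool) {n x y : Nat} (hy : x ≤ y) (hlt : y < nextFree act n x) :
    act y = true := by
  fun_induction nextFree act n x with
  | case1 x h2 hact ih =>
    rcases Nat.eq_or_lt_of_le hy with rfl | h3
    · simpa using hact
    · exact ih (by omega) hlt
  | case2 x h2 hact => omega
  | case3 x h2 => omega

lemma nf_unique (act : Nat → Bool) {n x z : Nat} (hz : x ≤ z) (hzn : z ≤ n)
    (hfree : act z = false) (hbelow : ∀ y, x ≤ y → y < z → act y = true) :
    nextFree act n x = z := by
  fun_induction nextFree act n x with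
  | case1 x h2 hact ih =>
    have hxz : x < z := by
      rcases Nat.eq_or_lt_of_le hz with rfl | h3
      · simp [hfree] at hact
      · exact h3
    exact ih (by omega) (fun y h1 h2 => hbelow y (by omega) h2)
  | case2 x h2 hact =>
    by_contra hne
    have := hbelow x le_rfl (by omega)
    simp [this] at hact
  | case3 x h2 => omega

lemma nf_congr (act act' : Nat → Bool) {n x : Nat} (hx : x ≤ n) (hn : act n = false)
    (h : ∀ j, x ≤ j → act j = act' j) : nextFree act' n x = nextFree act n x := by
  refine nf_unique act' (nf_ge act n x) (nf_le act hx) ?_ ?_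
  · rw [← h _ (nf_ge act n x)]; exact nf_free act hx hn
  · intro y h1 h2; rw [← h _ h1]; exact nf_active act h1 h2

lemma nf_mono (act act' : Nat → Bool) {n x : Nat} (hsub : ∀ j, act j = true → act' j = true)
    (hx : x ≤ n) (hn' : act' n = false) : nextFree act n x ≤ nextFree act' n x := by
  by_contra hlt
  have h1 : act (nextFree act' n x) = true :=
    nf_active (n := n) act (nf_ge act' n x) (by omega)
  have h2 := nf_free act' hx hn'
  simp [hsub _ h1] at h2

lemma nf_between (act : Nat → Bool) {n x y : Nat} (hxy : x ≤ y)
    (hy : y ≤ nextFree act n x) (hx : x ≤ n) (hn : act n = false) :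
    nextFree act n y = nextFree act n x := by
  refine nf_unique act hy (nf_le act hx) (nf_free act hx hn) ?_
  intro j h1 h2; exact nf_active act (by omega) h2

lemma runlen_le (act : Nat → Bool) (r : Nat) : runlen act r ≤ r := by
  induction r with
  | zero => simp [runlen]
  | succ r ih => rw [runlen]; split <;> omega

lemma runlen_congr (act act' : Nat → Bool) {r : Nat} (h : ∀ j, j < r → act j = act' j) :
    runlen act r = runlen act' r := by
  induction r with
  | zero => simp [runlen]
  | succ r ih =>
    rw [runlen, runlen, h r (by omega), ih (fun j hj => h j (by omega))]

lemma runlen_zero_of_false (act : Nat → Bool) (h : ∀ j, act j = false) (r : Nat) :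
    runlen act r = 0 := by
  cases r with
  | zero => rfl
  | succ r => rw [runlen, h r]; simp

lemma runlen_active (act : Nat → Bool) {r m : Nat} (hm : m < runlen act r) :
    act (r - 1 - m) = true := by
  induction r generalizing m with
  | zero => simp [runlen] at hm
  | succ r ih =>
    rw [runlen] at hm
    by_cases h : act r = true
    · rw [h] at hm; simp at hm
      cases m with
      | zero => simpa using h
      | succ m =>
        rw [show r + 1 - 1 - (m+1) = r - 1 - m by omega]
        exact ih (by omega)
    · simp at h; rw [h] at hm; simp at hm

lemma runlen_ge (act : Nat → Bool) {r s : Nat} (hs : s ≤ r)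
    (h : ∀ j, s ≤ j → j < r → act j = true) : r - s ≤ runlen act r := by
  induction r with
  | zero => omega
  | succ r ih =>
    rcases Nat.eq_or_lt_of_le hs with rfl | h2
    · omega
    · rw [runlen, h r (by omega) (by omega)]
      have := ih (by omega) (fun j h1 h2 => h j h1 (by omega))
      simp; omega

lemma runlen_freeBetween (act act' : Nat → Bool) {f r : Nat} (hf : f < r)
    (haf : act f = false) (ha'f : act' f = false)
    (h : ∀ j, f < j → j < r → act j = act' j) : runlen act' r = runlen act r := by
  induction r with
  | zero => omega
  | succ r ih =>
    rcases Nat.eq_or_lt_of_le (by omega : f + 1 ≤ r + 1) with h2 | h2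
    · have : f = r := by omega
      subst this
      rw [runlen, runlen, haf, ha'f]; simp
    · rw [runlen, runlen, ← h r (by omega) (by omega),
        ih (by omega) (fun j h1 h3 => h j h1 (by omega))]

lemma runlen_activation (act act' : Nat → Bool) {a b : Nat} (_ha : act a = false)
    (hmid : ∀ j, a < j → j < b → act j = true) (hab : a ≤ b)
    (hact' : ∀ j, act' j = (if j = a then true else act j)) :
    runlen act' b = (b - a) + runlen act a := by
  have key : ∀ m, a + m ≤ b → runlen act' (a + m) = m + runlen act a := by
    intro m
    induction m with
    | zero =>
      intro _
      simpa using runlen_congr act' act (fun j hj => by rw [hact' j]; simp [show j ≠ a by omega])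
    | succ m ih =>
      intro hm
      have h1 : act' (a + m) = true := by
        rw [hact']
        rcases Nat.eq_zero_or_pos m with rfl | hpos
        · simp
        · have hne : ¬ (a + m = a) := by omega
          rw [if_neg hne]
          exact hmid _ (by omega) (by omega)
      have h2 := ih (by omega)
      have h3 : a + (m+1) = (a + m) + 1 := by omega
      rw [h3, runlen, h1]
      simp only [if_true]
      omega
  have := key (b - a) (by omega)
  rw [(show a + (b - a) = b by omega)] at this
  omega

lemma runlen_gap (act : Nat → Bool) {a b : Nat} (ha : act a = false)
    (hmid : ∀ j, a < j → j < b → act j = true) (hab : a + 1 ≤ b) :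
    runlen act b = b - (a + 1) := by
  have key : ∀ m, a + 1 + m ≤ b → runlen act (a + 1 + m) = m := by
    intro m
    induction m with
    | zero => intro _; rw [show a + 1 + 0 = a + 1 by omega, runlen, ha]; simp
    | succ m ih =>
      intro hm
      rw [show a + 1 + (m+1) = (a + 1 + m) + 1 by omega, runlen,
        hmid _ (by omega) (by omega), ih (by omega)]
      simp
  have := key (b - (a+1)) (by omega)
  rw [(show a + 1 + (b - (a+1)) = b by omega)] at this
  omega

-- ---- find ----
lemma getD_set_self (l : List Nat) (x v : Nat) (h : x < l.length) :
    (l.set x v).getD x 0 = v := by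
  rw [List.getD_eq_getElem?_getD]; simp [h]

lemma getD_set_ne (l : List Nat) {x y : Nat} (v : Nat) (h : y ≠ x) :
    (l.set x v).getD y 0 = l.getD y 0 := by
  rw [List.getD_eq_getElem?_getD, List.getD_eq_getElem?_getD, List.getElem?_set_ne (by omega)]

lemma pyFind_spec (act : Nat → Bool) (n : Nat) (hn : act n = false) :
    ∀ fuel x p, GoodP act n p → x ≤ n → n + 1 ≤ fuel + x →
      (pyFind fuel p x).2 = nextFree act n x ∧ GoodP act n (pyFind fuel p x).1 ∧
      (pyFind fuel p x).1.length = p.length := by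
  intro fuel
  induction fuel with
  | zero => intro x p _ hx hf; omega
  | succ fuel ih =>
    intro x p hG hx hf
    have hlen := hG.1
    by_cases hax : act x = true
    · have hx' : x < n := by
        rcases Nat.eq_or_lt_of_le hx with rfl | h
        · simp [hn] at hax
        · exact h
      obtain ⟨h1, h2⟩ := (hG.2 x hx).2 hax
      have hnf1 : nextFree act n (x + 1) ≤ n := nf_le act (by omega)
      have hpxn : p.getD x 0 ≤ n := le_trans h2 hnf1
      have hrec := ih (p.getD x 0) p hG hpxn (by omega)
      have hne : p.getD x 0 ≠ x := by omega
      have hstep : nextFree act n x = nextFree act n (x + 1) := by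
        rw [nextFree]; simp [hx', hax]
      have hroot : nextFree act n (p.getD x 0) = nextFree act n (x + 1) :=
        nf_between act (by omega) h2 (by omega) hn
      have hxx : nextFree act n x = nextFree act n (p.getD x 0) := by
        rw [hstep, hroot]
      rw [pyFind]
      simp only [hne, ne_eq, not_false_eq_true, if_pos]
      set L := (pyFind fuel p (p.getD x 0)).1 with hL
      set v := (pyFind fuel p (p.getD x 0)).2 with hv
      have hLlen : L.length = p.length := hrec.2.2
      have hGL : GoodP act n L := hrec.2.1
      have hvroot : v = nextFree act n (p.getD x 0) := hrec.1
      refine ⟨by simp [hxx.symm ▸ hvroot], ⟨by simp [hLlen, hlen], ?_⟩,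
        by simp [hLlen]⟩
      intro y hy
      by_cases hyx : y = x
      · subst hyx
        have hyL : y < L.length := by omega
        constructor
        · intro hcontra; rw [hcontra] at hax; cases hax
        · intro _
          rw [getD_set_self L y v hyL, hvroot, hroot]
          constructor
          · have := nf_ge act n (y + 1); omega
          · exact le_rfl
      · rw [getD_set_ne L v hyx]
        exact hGL.2 y hy
    · simp only [Bool.not_eq_true] at hax
      have hpx : p.getD x 0 = x := (hG.2 x hx).1 hax
      have hnf : nextFree act n x = x := by
        rw [nextFree]; split
        · simp [hax]
        · rfl
      rw [pyFind]
      simp only [hpx]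
      simp [hnf, hG]

-- ---- activation step ----
lemma actI_succ (q : List Nat) (i : Nat) (hi : i < q.length) (j : Nat) :
    actI q (i + 1) j = (if j = q.getD i 0 then true else actI q i j) := by
  have hgetD : q.getD i 0 = q[i] := List.getD_eq_getElem q 0 hi
  unfold actI
  by_cases hj : j = q.getD i 0
  · subst hj
    rw [if_pos rfl]
    simp only [decide_eq_true_eq]
    rw [hgetD]
    exact List.mem_take_iff_getElem.mpr ⟨i, by omega, rfl⟩
  · rw [if_neg hj]
    simp only [List.take_add_one, List.getElem?_eq_getElem hi, Option.toList_some,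
      List.mem_append, List.mem_singleton]
    rw [hgetD] at hj
    simp [hj]

lemma actI_mem (q : List Nat) (i t : Nat) (h : actI q i t = true) :
    ∃ s, s < i ∧ s < q.length ∧ q.getD s 0 = t := by
  unfold actI at h
  simp only [decide_eq_true_eq, List.mem_take_iff_getElem] at h
  obtain ⟨s, hs, hval⟩ := h
  exact ⟨s, by omega, by omega, by rw [List.getD_eq_getElem q 0 (by omega)]; exact hval⟩

lemma actI_false_of_nodup (q : List Nat) (i : Nat) (hi : i < q.length) (hnd : q.Nodup) :
    actI q i (q.getD i 0) = false := by
  rw [List.getD_eq_getElem q 0 hi]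
  unfold actI
  simp only [decide_eq_false_iff_not, List.mem_take_iff_getElem]
  rintro ⟨s, hs, hval⟩
  have heq : s = i := (List.Nodup.getElem_inj_iff hnd (hi := by omega) (hj := hi)).mp hval
  omega

-- ===== main simulation lemmas (statements reference only defs above) =====

lemma qok_facts (nums : List Int) (q : List Nat) (hQ : QOk nums q) :
    q.length = nums.length ∧ q.Nodup ∧
    (∀ t, t < q.length → q.getD t 0 < nums.length) ∧
    (∀ j, j < nums.length → j ∈ q) := by
  have hlen : q.length = nums.length := by
    rw [hQ.1.length_eq, List.length_range]
  have hnd : q.Nodup := hQ.1.symm.nodup (List.nodup_range)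
  refine ⟨hlen, hnd, ?_, ?_⟩
  · intro t ht
    have : q.getD t 0 ∈ q := by
      rw [List.getD_eq_getElem q 0 ht]; exact List.getElem_mem _
    have := hQ.1.mem_iff.mp this
    simpa using this
  · intro j hj
    exact hQ.1.mem_iff.mpr (by simpa using hj)

lemma actI_n_false (nums : List Int) (q : List Nat) (hQ : QOk nums q) (i : Nat) :
    actI q i nums.length = false := by
  unfold actI
  simp only [decide_eq_false_iff_not]
  intro hmemn
  have h1 : nums.length ∈ q := List.mem_of_mem_take hmemn
  have := hQ.1.mem_iff.mp h1
  simp at this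

lemma runlen_unchanged (act act' : Nat → Bool) {a b r : Nat}
    (hact' : ∀ j, act' j = (if j = a then true else act j))
    (hmid : ∀ j, a < j → j < b → act j = true)
    (hbfree : act b = false) (hab : a < b)
    (_hra : r ≠ a) (hrb : r ≠ b) (hfr : act r = false) :
    runlen act' r = runlen act r := by
  by_cases hcase : r ≤ a
  · exact (runlen_congr act act' (fun j hj => by rw [hact' j, if_neg (by omega)])).symm
  · have hrb2 : b < r := by
      by_contra hc
      have := hmid r (by omega) (by omega)
      rw [this] at hfr; cases hfr
    exact runlen_freeBetween act act' hrb2 hbfree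
      (by rw [hact' b, if_neg (by omega)]; exact hbfree)
      (fun j h1 h2 => (by rw [hact' j, if_neg (by omega)] : act' j = act j).symm)

lemma pyWhile_step (nums : List Int) (threshold : Int) (q : List Nat) (k : Int) (n i : Nat)
    (p sz : List Nat) (a : Nat) (fr : List Nat × Nat) (sz1 : List Nat)
    (ha : a = q.getD i 0)
    (hfr : fr = pyFind (n + 1) p (a + 1))
    (hsz1 : sz1 = sz.set fr.2 (sz.getD fr.2 0 + sz.getD a 0))
    (hcond : i < n ∧ nums.getD (q.getD i 0) 0 > PySem.Int.floordiv threshold k) :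
    pyWhile nums threshold q k n i p sz =
      if ((sz1.getD fr.2 0 : Int) - 1) ≥ k then (some k, fr.1, sz1, i)
      else pyWhile nums threshold q k n (i + 1) (fr.1.set a fr.2) sz1 := by
  subst ha; subst hfr; subst hsz1
  rw [pyWhile, dif_pos hcond]

lemma pyWhile_exit (nums : List Int) (threshold : Int) (q : List Nat) (k : Int) (n i : Nat)
    (p sz : List Nat)
    (hcond : ¬ (i < n ∧ nums.getD (q.getD i 0) 0 > PySem.Int.floordiv threshold k)) :
    pyWhile nums threshold q k n i p sz = (none, p, sz, i) := by
  rw [pyWhile, dif_neg hcond]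

lemma pyWhile_spec (nums : List Int) (threshold : Int) (q : List Nat)
    (hQ : QOk nums q) (K : Nat) (_hK : 1 ≤ K) :
    ∀ d i p sz, nums.length - i ≤ d → LoopInv nums threshold q K i p sz →
      (∃ p' sz' i',
        pyWhile nums threshold q (K : Int) nums.length i p sz = (none, p', sz', i') ∧
        LoopInv nums threshold q K i' p' sz' ∧
        (i' = nums.length ∨
          ¬ (nums.getD (q.getD i' 0) 0 > PySem.Int.floordiv threshold (K : Int)))) ∨
      (∃ p' sz' i',
        pyWhile nums threshold q (K : Int) nums.length i p sz = (some (K : Int), p', sz', i') ∧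
        WinP nums (PySem.Int.floordiv threshold (K : Int)) K) := by
  intro d
  induction d with
  | zero =>
    intro i p sz hd hInv
    left
    have hin : i = nums.length := by
      have := hInv.1; omega
    refine ⟨p, sz, i, pyWhile_exit _ _ _ _ _ _ _ _ (by omega), hInv, Or.inl hin⟩
  | succ d ih =>
    intro i p sz hd hInv
    by_cases hcond : i < nums.length ∧
        nums.getD (q.getD i 0) 0 > PySem.Int.floordiv threshold (K : Int)
    · obtain ⟨hilt, hgt⟩ := hcond
      obtain ⟨hi, hG, hS, hNR, hEV⟩ := hInv
      obtain ⟨hlenq, hnd, hltq, hmem⟩ := qok_facts nums q hQ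
      set n := nums.length with hn
      set a := q.getD i 0 with ha
      have han : a < n := hltq i (by omega)
      have hactn : actI q i n = false := actI_n_false nums q hQ i
      have hacta : actI q i a = false := actI_false_of_nodup q i (by omega) hnd
      have hfind := pyFind_spec (actI q i) n hactn (n + 1) (a + 1) p hG (by omega) (by omega)
      set fr := pyFind (n + 1) p (a + 1) with hfr
      set b := fr.2 with hb
      have hbroot : b = nextFree (actI q i) n (a + 1) := hfind.1
      have hblb : a + 1 ≤ b := by rw [hbroot]; exact nf_ge _ _ _
      have hbn : b ≤ n := by rw [hbroot]; exact nf_le _ (by omega)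
      have hbfree : actI q i b = false := by rw [hbroot]; exact nf_free _ (by omega) hactn
      have hmid : ∀ j, a < j → j < b → actI q i j = true := by
        intro j h1 h2; rw [hbroot] at h2; exact nf_active _ (by omega) h2
      have hact' : ∀ j, actI q (i + 1) j = (if j = a then true else actI q i j) :=
        fun j => actI_succ q i (by omega) j
      have hrunb : runlen (actI q (i + 1)) b = (b - a) + runlen (actI q i) a :=
        runlen_activation _ _ hacta hmid (by omega) hact'
      have hgap : runlen (actI q i) b = b - (a + 1) := runlen_gap _ hacta hmid (by omega)
      have hsza : sz.getD a 0 = 1 + runlen (actI q i) a := hS.2 a (by omega) hacta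
      have hszb : sz.getD b 0 = 1 + runlen (actI q i) b := hS.2 b (by omega) hbfree
      have hszlen : sz.length = n + 1 := hS.1
      set sz1 := sz.set b (sz.getD b 0 + sz.getD a 0) with hsz1
      have hsz1b : sz1.getD b 0 = 1 + runlen (actI q (i + 1)) b := by
        rw [hsz1, getD_set_self _ _ _ (by omega), hsza, hszb, hgap, hrunb]; omega
      have hstep := pyWhile_step nums threshold q (K : Int) n i p sz a fr sz1
        ha hfr hsz1 ⟨hilt, hgt⟩
      by_cases hchk : ((sz1.getD b 0 : Int) - 1) ≥ (K : Int)
      · right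
        refine ⟨fr.1, sz1, i, by rw [hstep, if_pos hchk], ?_⟩
        have hKR : K ≤ runlen (actI q (i + 1)) b := by
          rw [hsz1b] at hchk; push_cast at hchk; omega
        have hKb : K ≤ b := le_trans hKR (runlen_le _ b)
        refine ⟨b - K, by omega, ?_⟩
        intro t h1 h2
        have hact : actI q (i + 1) t = true := by
          have := runlen_active (actI q (i + 1)) (r := b) (m := b - 1 - t) (by omega)
          rw [show b - 1 - (b - 1 - t) = t by omega] at this
          exact this
        rw [hact' t] at hact
        by_cases hta : t = a
        · rw [hta]; exact hgt
        · rw [if_neg hta] at hact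
          obtain ⟨s, hs1, hs2, hs3⟩ := actI_mem q i t hact
          have := hEV s hs1
          rw [hs3] at this
          exact this
      · have hKR : runlen (actI q (i + 1)) b < K := by
          rw [hsz1b] at hchk; push_cast at hchk; omega
        have hfrG : GoodP (actI q i) n fr.1 := hfind.2.1
        have hfrlen : fr.1.length = n + 1 := by rw [hfind.2.2]; exact hG.1
        have hG2 : GoodP (actI q (i + 1)) n (fr.1.set a b) := by
          refine ⟨by rw [List.length_set]; exact hfrlen, ?_⟩
          intro x hx
          by_cases hxa : x = a
          · constructor
            · intro hfalse; rw [hact' x, if_pos hxa] at hfalse; cases hfalse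
            · intro _
              rw [hxa, getD_set_self _ _ _ (by omega)]
              refine ⟨by omega, ?_⟩
              have hcg : nextFree (actI q (i + 1)) n (a + 1) = nextFree (actI q i) n (a + 1) :=
                nf_congr _ _ (by omega) hactn
                  (fun j hj => by rw [hact' j, if_neg (by omega)])
              rw [hcg, ← hbroot]
          · constructor
            · intro hfa
              rw [hact' x, if_neg hxa] at hfa
              rw [getD_set_ne _ _ hxa]
              exact (hfrG.2 x hx).1 hfa
            · intro hta
              rw [hact' x, if_neg hxa] at hta
              rw [getD_set_ne _ _ hxa]
              obtain ⟨hlt2, hle2⟩ := (hfrG.2 x hx).2 hta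
              have hxn : x ≠ n := fun h => by rw [h, hactn] at hta; cases hta
              refine ⟨hlt2, le_trans hle2 ?_⟩
              refine nf_mono _ _ ?_ (by omega) ?_
              · intro j hj; rw [hact' j]; split
                · rfl
                · exact hj
              · rw [hact' n, if_neg (by omega)]; exact hactn
        have hS2 : SzOk (actI q (i + 1)) n sz1 := by
          refine ⟨by rw [hsz1, List.length_set]; exact hszlen, ?_⟩
          intro r hr hfr2
          have hra : r ≠ a := by
            intro h; rw [h, hact' a, if_pos rfl] at hfr2; cases hfr2
          have hfr0 : actI q i r = false := by rw [hact' r, if_neg hra] at hfr2; exact hfr2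
          by_cases hrb : r = b
          · rw [hrb]
            exact hsz1b
          · rw [hsz1, getD_set_ne _ _ hrb, hS.2 r hr hfr0]
            congr 1
            exact (runlen_unchanged (actI q i) (actI q (i + 1)) hact' hmid hbfree
              (by omega) hra hrb hfr0).symm
        have hNR2 : NoRun (actI q (i + 1)) n K := by
          intro r hr hfr2
          have hra : r ≠ a := by
            intro h; rw [h, hact' a, if_pos rfl] at hfr2; cases hfr2
          have hfr0 : actI q i r = false := by rw [hact' r, if_neg hra] at hfr2; exact hfr2
          by_cases hrb : r = b
          · rw [hrb]; exact hKR
          · rw [runlen_unchanged (actI q i) (actI q (i + 1)) hact' hmid hbfree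
              (by omega) hra hrb hfr0]
            exact hNR r hr hfr0
        have hEV2 : ∀ t, t < i + 1 →
            nums.getD (q.getD t 0) 0 > PySem.Int.floordiv threshold (K : Int) := by
          intro t ht
          by_cases hti : t < i
          · exact hEV t hti
          · have : t = i := by omega
            rw [this, ← ha]; exact hgt
        have hInv2 : LoopInv nums threshold q K (i + 1) (fr.1.set a b) sz1 :=
          ⟨by omega, hG2, hS2, hNR2, hEV2⟩
        have hrec := ih (i + 1) (fr.1.set a b) sz1 (by omega) hInv2
        rw [hstep, if_neg hchk]
        exact hrec
    · left
      refine ⟨p, sz, i, pyWhile_exit _ _ _ _ _ _ _ _ hcond, hInv, ?_⟩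
      by_cases hi2 : i < nums.length
      · exact Or.inr (fun hgt => hcond ⟨hi2, hgt⟩)
      · exact Or.inl (by have := hInv.1; omega)

lemma exit_noWin (nums : List Int) (threshold : Int) (q : List Nat) (hQ : QOk nums q)
    (K i' : Nat) (p' sz' : List Nat) (hInv : LoopInv nums threshold q K i' p' sz')
    (hexit : i' = nums.length ∨
      ¬ (nums.getD (q.getD i' 0) 0 > PySem.Int.floordiv threshold (K : Int))) :
    ¬ WinP nums (PySem.Int.floordiv threshold (K : Int)) K := by
  rintro ⟨j, hjK, hall⟩
  obtain ⟨hlen, hnd, hltq, hmem⟩ := qok_facts nums q hQ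
  obtain ⟨hi, hG, hS, hNR, hEV⟩ := hInv
  have hactn : actI q i' nums.length = false := actI_n_false nums q hQ i'
  have hup : ∀ u, j ≤ u → u < j + K → actI q i' u = true := by
    intro u h1 h2
    have hun : u < nums.length := by omega
    obtain ⟨s, hs, hgs⟩ := List.mem_iff_getElem.mp (hmem u hun)
    by_cases hsi : s < i'
    · unfold actI
      simp only [decide_eq_true_eq]
      exact List.mem_take_iff_getElem.mpr ⟨s, by omega, hgs⟩
    · exfalso
      rcases hexit with heq | hcond
      · omega
      · have hmono := hQ.2 i' s (by omega) (by omega)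
        have hu := hall u h1 h2
        rw [List.getD_eq_getElem q 0 hs, hgs] at hmono
        omega
  have hjn : j + K ≤ nums.length := hjK
  have hr0n : nextFree (actI q i') nums.length (j + K) ≤ nums.length := nf_le _ hjn
  have hr0free : actI q i' (nextFree (actI q i') nums.length (j + K)) = false :=
    nf_free _ hjn hactn
  have hr0ge : j + K ≤ nextFree (actI q i') nums.length (j + K) := nf_ge _ _ _
  have hrun : (nextFree (actI q i') nums.length (j + K)) - j ≤
      runlen (actI q i') (nextFree (actI q i') nums.length (j + K)) := by
    refine runlen_ge _ (by omega) ?_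
    intro u hu1 hu2
    by_cases hu3 : u < j + K
    · exact hup u hu1 hu3
    · exact nf_active _ (by omega) hu2
  have := hNR _ hr0n hr0free
  omega

lemma inv_bump (nums : List Int) (threshold : Int) (q : List Nat) (hQ : QOk nums q)
    (K i : Nat) (p sz : List Nat) (hK : 1 ≤ K)
    (hInv : LoopInv nums threshold q K i p sz)
    (hW1 : ¬ WinP nums (PySem.Int.floordiv threshold ((1 : Nat) : Int)) 1) :
    LoopInv nums threshold q (K + 1) i p sz := by
  obtain ⟨h1, h2, h3, h4, h5⟩ := hInv
  obtain ⟨hlen, hnd, hltq, hmem⟩ := qok_facts nums q hQ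
  refine ⟨h1, h2, h3, fun r hr hf => Nat.lt_succ_of_lt (h4 r hr hf), ?_⟩
  intro t ht
  have hev := h5 t ht
  have hc : ((K + 1 : Nat) : Int) = (K : Int) + 1 := by push_cast; ring
  rw [hc]
  rcases (by omega : 0 ≤ threshold ∨ threshold < 0) with hpos | hneg
  · have := fdiv_antitone threshold hpos K hK
    omega
  · exfalso
    have hqt : q.getD t 0 < nums.length := hltq t (by omega)
    have hnw : ¬ nums.getD (q.getD t 0) 0 > threshold := by
      intro hgt
      refine hW1 ⟨q.getD t 0, by omega, fun u hu1 hu2 => ?_⟩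
      rw [show u = q.getD t 0 by omega]
      rw [show ((1 : Nat) : Int) = 1 from rfl, fdiv_one]
      exact hgt
    have hge := fdiv_ge_self_neg threshold hneg K hK
    omega

lemma inv_init (nums : List Int) (threshold : Int) (q : List Nat) :
    LoopInv nums threshold q 1 0 (List.range (nums.length + 1))
      (List.replicate (nums.length + 1) 1) := by
  have hact : ∀ j, actI q 0 j = false := by intro j; simp [actI]
  refine ⟨by omega, ⟨by simp, ?_⟩, ⟨by simp, ?_⟩, ?_, ?_⟩
  · intro x hx
    constructor
    · intro _
      rw [List.getD_eq_getElem _ 0 (by simp; omega), List.getElem_range]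
    · intro hc; rw [hact x] at hc; cases hc
  · intro r hr _
    rw [List.getD_eq_getElem _ 0 (by simp; omega), List.getElem_replicate,
      runlen_zero_of_false _ hact]
  · intro r hr _
    rw [runlen_zero_of_false _ hact]; omega
  · intro t ht; omega

-- ---- B side ----
def winB (bs : List Bool) (K : Nat) : Prop :=
  ∃ j, j + K ≤ bs.length ∧ ∀ t, j ≤ t → t < j + K → bs.getD t false = true

lemma getD_rep {r t : Nat} (h : t < r) : (List.replicate r true).getD t false = true := by
  rw [List.getD_eq_getElem _ _ (by simpa using h), List.getElem_replicate]

lemma winB_replicate {r K : Nat} : winB (List.replicate r true) K ↔ K ≤ r := by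
  constructor
  · rintro ⟨j, hl, _⟩; simp at hl; omega
  · intro h; exact ⟨0, by simp; omega, fun t h1 h2 => getD_rep (by omega)⟩

lemma winB_prefix_rep {r K : Nat} (l : List Bool) (h : K ≤ r) :
    winB (List.replicate r true ++ l) K := by
  refine ⟨0, by simp; omega, fun t h1 h2 => ?_⟩
  rw [List.getD_append _ _ _ t (by simp; omega)]
  exact getD_rep (by omega)

lemma winB_append_false {K : Nat} (hK : 1 ≤ K) (as bs : List Bool) :
    winB (as ++ false :: bs) K ↔ winB as K ∨ winB bs K := by
  constructor
  · rintro ⟨j, hl, hall⟩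
    simp only [List.length_append, List.length_cons] at hl
    by_cases hj : j + K ≤ as.length
    · left
      exact ⟨j, hj, fun t h1 h2 => by
        rw [← List.getD_append _ _ _ t (by omega)]; exact hall t h1 h2⟩
    · right
      have hj2 : as.length + 1 ≤ j := by
        by_contra hc
        have := hall as.length (by omega) (by omega)
        rw [List.getD_append_right _ _ _ _ (by omega), Nat.sub_self] at this
        simp at this
      refine ⟨j - (as.length + 1), by omega, fun t h1 h2 => ?_⟩
      have := hall (t + as.length + 1) (by omega) (by omega)
      rw [List.getD_append_right _ _ _ _ (by omega)] at this
      rw [show t + as.length + 1 - as.length = t + 1 by omega] at this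
      simpa using this
  · rintro (⟨j, hl, hall⟩ | ⟨j, hl, hall⟩)
    · exact ⟨j, by simp; omega, fun t h1 h2 => by
        rw [List.getD_append _ _ _ t (by omega)]; exact hall t h1 h2⟩
    · refine ⟨j + as.length + 1, by simp; omega, fun t h1 h2 => ?_⟩
      rw [List.getD_append_right _ _ _ _ (by omega)]
      have := hall (t - as.length - 1) (by omega) (by omega)
      rw [show t - as.length = (t - as.length - 1) + 1 by omega]
      simpa using this

lemma altInner_true_iff (bound : Int) (K : Nat) (hK : 1 ≤ K) :
    ∀ (l : List Int) (run : Nat), run < K →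
      (altInner bound (K : Int) l (run : Int) = true ↔
        winB (List.replicate run true ++ l.map (fun x => decide (x > bound))) K) := by
  intro l
  induction l with
  | nil =>
    intro run hrun
    simp only [altInner, List.map_nil, List.append_nil]
    rw [winB_replicate]
    simp; omega
  | cons x xs ih =>
    intro run hrun
    by_cases hx : x > bound
    · have hmap : (x :: xs).map (fun x => decide (x > bound)) =
          true :: xs.map (fun x => decide (x > bound)) := by simp [hx]
      have hrep : List.replicate run true ++ true :: xs.map (fun x => decide (x > bound)) =
          List.replicate (run + 1) true ++ xs.map (fun x => decide (x > bound)) := by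
        rw [List.replicate_succ']
        simp
      rw [hmap, hrep]
      rw [altInner]
      simp only [if_pos hx]
      have hcast : (run : Int) + 1 = ((run + 1 : Nat) : Int) := by push_cast; ring
      by_cases hcond : run + 1 = K
      · rw [if_pos (by rw [hcast]; exact_mod_cast (by omega : K ≤ run + 1))]
        simp only [true_iff]
        exact winB_prefix_rep _ (by omega)
      · rw [if_neg (by rw [hcast]; intro hc; exact absurd (by exact_mod_cast hc : K ≤ run + 1) (by omega))]
        rw [hcast]
        exact ih (run + 1) (by omega)
    · have hmap : (x :: xs).map (fun x => decide (x > bound)) =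
          false :: xs.map (fun x => decide (x > bound)) := by simp [hx]
      rw [hmap, altInner]
      simp only [if_neg hx]
      rw [if_neg (by intro hc; exact absurd (by exact_mod_cast hc : K ≤ 0) (by omega))]
      have h0 := ih 0 (by omega)
      simp only [List.replicate_zero, List.nil_append] at h0
      rw [show ((0:Nat) : Int) = 0 from rfl] at h0
      rw [h0, winB_append_false hK]
      rw [winB_replicate]
      constructor
      · intro h; right; exact h
      · rintro (h | h)
        · exact absurd h (by omega)
        · exact h

lemma altInner_iff_winP (nums : List Int) (bound : Int) (K : Nat) (hK : 1 ≤ K) :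
    altInner bound (K : Int) nums 0 = true ↔ WinP nums bound K := by
  have h := altInner_true_iff bound K hK nums 0 (by omega)
  rw [show ((0:Nat) : Int) = 0 from rfl] at h
  rw [h]
  simp only [List.replicate_zero, List.nil_append]
  constructor
  · rintro ⟨j, hl, hall⟩
    simp only [List.length_map] at hl
    refine ⟨j, hl, fun t h1 h2 => ?_⟩
    have := hall t h1 h2
    rw [List.getD_eq_getElem _ _ (by simp; omega), List.getElem_map] at this
    rw [List.getD_eq_getElem _ _ (by omega)]
    simpa using this
  · rintro ⟨j, hl, hall⟩
    refine ⟨j, by simp; omega, fun t h1 h2 => ?_⟩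
    have := hall t h1 h2
    rw [List.getD_eq_getElem _ _ (by omega)] at this
    rw [List.getD_eq_getElem _ _ (by simp; omega), List.getElem_map]
    simpa using this

-- ---- q construction ----
lemma insertBy_pairwise {α : Type} (P : α → α → Prop) (bef : α → α → Bool)
    (htr : ∀ a b c : α, P a b → P b c → P a c)
    (hP : ∀ a b, (bef a b = true → P a b) ∧ (bef a b = false → P b a)) :
    ∀ (x : α) (l : List α), l.Pairwise P →
      (PySem.List.insertBy bef x l).Pairwise P := by
  intro x l
  induction l with
  | nil => intro _; simp [show PySem.List.insertBy bef x [] = [x] from rfl]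
  | cons y ys ih =>
    intro hp
    rw [show PySem.List.insertBy bef x (y :: ys) =
      if bef x y then x :: y :: ys else y :: PySem.List.insertBy bef x ys from rfl]
    rcases List.pairwise_cons.mp hp with ⟨hy, hys⟩
    by_cases hb : bef x y = true
    · rw [if_pos hb]
      refine List.pairwise_cons.mpr ⟨?_, hp⟩
      intro z hz
      rcases List.mem_cons.mp hz with rfl | hz2
      · exact (hP x z).1 hb
      · exact htr _ _ _ ((hP x y).1 hb) (hy z hz2)
    · rw [if_neg hb]
      refine List.pairwise_cons.mpr ⟨?_, ih hys⟩
      intro z hz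
      rcases (PySem.List.mem_insertBy bef x z ys).mp hz with hzx | hz2
      · rw [hzx]; exact (hP x y).2 (by simpa using hb)
      · exact hy z hz2

lemma sorted2_rev_pairwise (xs : List (Int × Nat)) :
    (PySem.List.sorted2 xs Prod.fst Prod.snd true).Pairwise
      (fun a b : Int × Nat => b.1 ≤ a.1) := by
  have key : ∀ (l acc : List (Int × Nat)),
      acc.Pairwise (fun a b : Int × Nat => b.1 ≤ a.1) →
      (List.foldl (fun acc x => PySem.List.insertBy
        (fun a b : Int × Nat => decide (b.1 < a.1) || (!decide (a.1 < b.1) && decide (b.2 < a.2)))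
        x acc) acc l).Pairwise (fun a b : Int × Nat => b.1 ≤ a.1) := by
    intro l
    induction l with
    | nil => intro acc h; simpa using h
    | cons z zs ih =>
      intro acc h
      rw [List.foldl_cons]
      refine ih _ (insertBy_pairwise _ _ ?_ ?_ z acc h)
      · intro a b c h1 h2; omega
      · intro a b
        constructor
        · intro h1
          simp only [Bool.or_eq_true, Bool.and_eq_true, decide_eq_true_eq,
            Bool.not_eq_true', decide_eq_false_iff_not] at h1
          rcases h1 with h1 | ⟨h1, _⟩ <;> omega
        · intro h1
          simp only [Bool.or_eq_false_iff, Bool.and_eq_false_iff,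
            decide_eq_false_iff_not] at h1
          omega
  exact key xs [] List.Pairwise.nil

lemma qok (nums : List Int) :
    QOk nums ((PySem.List.sorted2 (nums.zip (List.range nums.length))
      Prod.fst Prod.snd true).map Prod.snd) := by
  set n := nums.length with hn
  set z := nums.zip (List.range n) with hz
  set sq := PySem.List.sorted2 z Prod.fst Prod.snd true with hsq
  have hperm : sq.Perm z := PySem.List.sorted2_perm z Prod.fst Prod.snd true
  have hzlen : z.length = n := by simp [hz, hn]
  have hsqlen : sq.length = n := by rw [hperm.length_eq, hzlen]
  have hqperm : (sq.map Prod.snd).Perm (List.range n) := by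
    have h1 := hperm.map Prod.snd
    rwa [List.map_snd_zip (by simp [hn])] at h1
  refine ⟨hqperm, ?_⟩
  have hval : ∀ pr ∈ sq, pr.1 = nums.getD pr.2 0 := by
    intro pr hpr
    have hmem : pr ∈ z := hperm.mem_iff.mp hpr
    obtain ⟨idx, hidx, hget⟩ := List.mem_iff_getElem.mp hmem
    rw [List.getElem_zip] at hget
    have hidx2 : idx < n := by rw [hzlen] at hidx; exact hidx
    rw [← hget]
    simp only [List.getElem_range]
    rw [List.getD_eq_getElem _ _ (by omega)]
  have hpair := sorted2_rev_pairwise z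
  rw [← hsq] at hpair
  intro t s hts hs
  have hqlen : (sq.map Prod.snd).length = n := by simp [hsqlen]
  have hgs : (sq.map Prod.snd).getD s 0 = (sq[s]'(by omega)).2 := by
    rw [List.getD_eq_getElem _ _ (by omega)]; simp
  have hgt : (sq.map Prod.snd).getD t 0 = (sq[t]'(by omega)).2 := by
    rw [List.getD_eq_getElem _ _ (by omega)]; simp
  rw [hgs, hgt]
  rcases Nat.eq_or_lt_of_le hts with rfl | hlt
  · exact le_rfl
  · have hp := List.pairwise_iff_getElem.mp hpair t s (by omega) (by omega) hlt
    have h1 := hval (sq[t]'(by omega)) (by exact List.getElem_mem _)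
    have h2 := hval (sq[s]'(by omega)) (by exact List.getElem_mem _)
    rw [h1, h2] at hp
    exact hp

-- ---- outer loop ----
lemma pyOuter_cons_none (nums : List Int) (threshold : Int) (q : List Nat) (n : Nat)
    (k : Int) (ks : List Int) (i : Nat) (p sz : List Nat) (p' sz' : List Nat) (i' : Nat)
    (h : pyWhile nums threshold q k n i p sz = (none, p', sz', i')) :
    pyOuter nums threshold q n (k :: ks) i p sz = pyOuter nums threshold q n ks i' p' sz' := by
  simp only [pyOuter, h]

lemma pyOuter_cons_some (nums : List Int) (threshold : Int) (q : List Nat) (n : Nat)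
    (k r : Int) (ks : List Int) (i : Nat) (p sz : List Nat) (p' sz' : List Nat) (i' : Nat)
    (h : pyWhile nums threshold q k n i p sz = (some r, p', sz', i')) :
    pyOuter nums threshold q n (k :: ks) i p sz = r := by
  simp only [pyOuter, h]

lemma pyOuter_spec (nums : List Int) (threshold : Int) (q : List Nat) (hQ : QOk nums q) :
    ∀ d K i p sz, nums.length + 1 - K ≤ d → 1 ≤ K →
      LoopInv nums threshold q K i p sz →
      (∀ K', 1 ≤ K' → K' < K → ¬ WinP nums (PySem.Int.floordiv threshold (K' : Int)) K') →
      pyOuter nums threshold q nums.length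
          (PySem.List.pyRange (K : Int) ((nums.length : Int) + 1) 1) i p sz
        = altOuter nums threshold
          (PySem.List.pyRange (K : Int) ((nums.length : Int) + 1) 1) := by
  intro d
  induction d with
  | zero =>
    intro K i p sz hd hK hInv hHist
    rw [PySem.List.pyRange_one_eq_nil (by exact_mod_cast (by omega : nums.length + 1 ≤ K))]
    rfl
  | succ d ih =>
    intro K i p sz hd hK hInv hHist
    by_cases hKn : K ≤ nums.length
    · have hcons : PySem.List.pyRange (K : Int) ((nums.length : Int) + 1) 1 =
          (K : Int) :: PySem.List.pyRange ((K : Int) + 1) ((nums.length : Int) + 1) 1 :=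
        PySem.List.pyRange_one_cons (by exact_mod_cast (by omega : K < nums.length + 1))
      have hcast : ((K : Int) + 1) = ((K + 1 : Nat) : Int) := by push_cast; ring
      rw [hcons, hcast]
      have hwhile := pyWhile_spec nums threshold q hQ K hK nums.length i p sz
        (by omega) hInv
      rcases hwhile with ⟨p', sz', i', heq, hInv', hexit⟩ | ⟨p', sz', i', heq, hwin⟩
      · have hnw := exit_noWin nums threshold q hQ K i' p' sz' hInv' hexit
        rw [pyOuter_cons_none nums threshold q nums.length _ _ i p sz p' sz' i' heq]
        rw [altOuter]
        rw [if_neg (by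
          intro hc
          exact hnw ((altInner_iff_winP nums _ K hK).mp hc))]
        have hW1 : ¬ WinP nums (PySem.Int.floordiv threshold ((1 : Nat) : Int)) 1 := by
          by_cases hK1 : K = 1
          · rw [← hK1]; exact hnw
          · exact hHist 1 (by omega) (by omega)
        refine ih (K + 1) i' p' sz' (by omega) (by omega)
          (inv_bump nums threshold q hQ K i' p' sz' hK hInv' hW1) ?_
        intro K' h1 h2
        by_cases hK' : K' < K
        · exact hHist K' h1 hK'
        · have : K' = K := by omega
          rw [this]; exact hnw
      · rw [pyOuter_cons_some nums threshold q nums.length _ _ _ i p sz p' sz' i' heq]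
        rw [altOuter]
        rw [if_pos ((altInner_iff_winP nums _ K hK).mpr hwin)]
    · rw [PySem.List.pyRange_one_eq_nil (by exact_mod_cast (by omega : nums.length + 1 ≤ K))]
      rfl

-- ===== VERDICT (by name: the statement is the Claim_ definition above) =====
theorem validSubarraySize_spec : Claim_equal_validSubarraySize := by
  intro nums threshold _
  unfold Spec_validSubarraySize validSubarraySize validSubarraySize_alt
  have h := pyOuter_spec nums threshold _ (qok nums) (nums.length + 1) 1 0
    (List.range (nums.length + 1)) (List.replicate (nums.length + 1) 1)
    (by omega) le_rfl (inv_init nums threshold _) (by omega)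
  simpa using h
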